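-- pv_equiv track=rewrite | github.com/znelson/advent-of-code | 2015/day19.py | apply_all_replacements
-- ===== SOURCE A (Python) =====
-- def apply_all_replacements(molecules, replacements):
-- 	new_molecules = set()
-- 	# loop the input molecules
-- 	for molecule in molecules:
-- 		# loop the available replacements
-- 		for to_replace, replacement in replacements:
-- 			# loop over the characters of this input molecule
-- 			for i in range(len(molecule) + 1 - len(to_replace)):
-- 				# check if the current character(s) match the bit to replace
-- 				a, b, c = molecule[0:i], molecule[i:i+len(to_replace)], molecule[i+len(to_replace):]
-- 				if b == to_replace:
-- 					# build a new molecule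
-- 					new_molecule = a + replacement + c
-- 					# add the new molecule to the set
-- 					new_molecules.add(new_molecule)
-- 	return new_molecules
-- ===== SOURCE B (Python) =====
-- def apply_all_replacements(molecules, replacements):
-- 	new_molecules = set()
-- 	# the pattern set and the distinct pattern lengths, computed once
-- 	patset = {t for t, _ in replacements}
-- 	lens = list(dict.fromkeys(len(t) for t, _ in replacements))
-- 	for molecule in molecules:
-- 		# stage 1: index the molecule — at each position try one substring per distinct
-- 		# pattern length and record its positions when it is a known pattern
-- 		occ = {}
-- 		for i in range(len(molecule) + 1):
-- 			for l in lens: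
-- 				if i + l <= len(molecule):
-- 					sub = molecule[i:i + l]
-- 					if sub in patset:
-- 						occ.setdefault(sub, []).append(i)
-- 		# stage 2: emit the substitutions from the index
-- 		for t, replacement in replacements:
-- 			for i in occ.get(t, ()):
-- 				new_molecules.add(molecule[:i] + replacement + molecule[i + len(t):])
-- 	return new_molecules
-- ===== Notes on version B (the rewrite author's own statement) =====
-- stated objective: faster
-- what changed: Instead of A's slice-and-compare of every replacement pattern at every position of every molecule, B builds a hash index per molecule: one sweep tries a single substring per distinct pattern LENGTH at each position and looks it up in a precomputed pattern set, grouping hit positions into a dict pattern -> positions; a second pass emits the substitutions from that index, so the scan cost no longer depends on the number of replacement pairs.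
import Mathlib
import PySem

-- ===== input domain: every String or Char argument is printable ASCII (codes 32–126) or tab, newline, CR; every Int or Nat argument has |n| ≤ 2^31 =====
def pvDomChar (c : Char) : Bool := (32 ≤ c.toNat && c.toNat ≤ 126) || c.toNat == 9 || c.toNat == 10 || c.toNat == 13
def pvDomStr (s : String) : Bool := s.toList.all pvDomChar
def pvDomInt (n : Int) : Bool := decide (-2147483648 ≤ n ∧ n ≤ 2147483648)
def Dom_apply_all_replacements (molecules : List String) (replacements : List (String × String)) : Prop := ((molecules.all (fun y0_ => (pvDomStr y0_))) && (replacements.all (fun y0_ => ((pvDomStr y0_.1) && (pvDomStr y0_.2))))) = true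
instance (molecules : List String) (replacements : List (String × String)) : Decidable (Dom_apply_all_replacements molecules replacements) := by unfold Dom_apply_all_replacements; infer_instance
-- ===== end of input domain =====

-- B replaces A's test-every-pattern-at-every-position scans by a hash index: per molecule,
-- one sweep tries a substring per distinct pattern LENGTH at each position and looks it up
-- in the pattern set, building an index pattern -> hit positions; a second pass emits the
-- substitutions from that index; same return value (a set).

-- ===== PORT A =====
def apply_all_replacements (molecules : List String) (replacements : List (String × String)) : List String :=
  molecules.foldl (fun newMolecules molecule =>
    replacements.foldl (fun newMolecules pr =>
      (PySem.List.pyRange 0 (PySem.Chars.len molecule.toList + 1 - PySem.Chars.len pr.1.toList)).foldl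
        (fun newMolecules i =>
          let a := PySem.List.slice molecule.toList (some 0) (some i)
          let b := PySem.List.slice molecule.toList (some i) (some (i + PySem.Chars.len pr.1.toList))
          let c := PySem.List.slice molecule.toList (some (i + PySem.Chars.len pr.1.toList)) none
          if b = pr.1.toList then PySem.Set.add newMolecules (String.ofList (a ++ pr.2.toList ++ c)) else newMolecules)
        newMolecules)
      newMolecules)
    ([] : PySem.Set String)

-- ===== PORT B =====
-- the per-molecule body of B's outer loop (stages 1-2 of Source B)
def pvAltBody (replacements : List (String × String)) (patset : PySem.Set String) (lens : List Int)
    (newMolecules : PySem.Set String) (m : List Char) : PySem.Set String :=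
  -- stage 1: occ = {}; for i in range(len(m)+1): for l in lens:
  --            if i + l <= len(m): sub = m[i:i+l]; if sub in patset: occ.setdefault(sub, []).append(i)
  let occ : PySem.Dict String (List Int) :=
    (PySem.List.pyRange 0 (PySem.Chars.len m + 1)).foldl (fun d i =>
      lens.foldl (fun d l =>
        if i + l ≤ PySem.Chars.len m then
          let sub := PySem.List.slice m (some i) (some (i + l))
          if PySem.Set.contains patset (String.ofList sub) then
            d.modify (String.ofList sub) [] (fun ps => ps ++ [i])
          else d
        else d) d)
      PySem.Dict.empty
  -- stage 2: for t, replacement in replacements: for i in occ.get(t, ()): add the substitution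
  replacements.foldl (fun s pr =>
    (occ.getD pr.1 []).foldl (fun s i =>
      PySem.Set.add s (String.ofList (PySem.Chars.slice m none (some i) ++ pr.2.toList ++
        PySem.Chars.slice m (some (i + PySem.Chars.len pr.1.toList)) none))) s) newMolecules

def apply_all_replacements_alt (molecules : List String) (replacements : List (String × String)) : List String :=
  -- patset = {t for t, _ in replacements}; lens = list(dict.fromkeys(len(t) for t, _ in replacements))
  let patset := PySem.Set.ofList (replacements.map (fun pr => pr.1))
  let lens := PySem.List.dedup (replacements.map (fun pr => PySem.Chars.len pr.1.toList))
  molecules.foldl (fun newMolecules molecule =>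
    pvAltBody replacements patset lens newMolecules molecule.toList)
    ([] : PySem.Set String)

-- ===== PRECONDITION & SPEC =====
def Spec_apply_all_replacements (molecules : List String) (replacements : List (String × String)) (out : List String) : Prop := out = apply_all_replacements_alt molecules replacements
instance (molecules : List String) (replacements : List (String × String)) (out : List String) : Decidable (Spec_apply_all_replacements molecules replacements out) := by unfold Spec_apply_all_replacements; infer_instance

-- ===== CLAIM (what is proved, stated in full; the proofs are below) =====
def Claim_equal_apply_all_replacements : Prop := ∀ (molecules : List String) (replacements : List (String × String)), Dom_apply_all_replacements molecules replacements → Spec_apply_all_replacements molecules replacements (apply_all_replacements molecules replacements)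

-- ===== LEMMAS AND PROOFS =====

-- a key of the index is determined by its string contents
theorem pv_ofList_eq_iff (l : List Char) (t : String) : String.ofList l = t ↔ l = t.toList := by
  constructor
  · intro h; rw [← h]; simp
  · intro h; subst h; exact String.ofList_toList

-- the substring tried at position i with length bound l has exactly l characters
theorem pv_length_slice (m : List Char) (i l : Int) (h0 : 0 ≤ i) (hl : 0 ≤ l)
    (hle : i + l ≤ (m.length : Int)) :
    (PySem.List.slice m (some i) (some (i + l))).length = l.toNat := by
  rw [PySem.List.slice_toNat m h0 (by omega)]
  simp [List.length_take, List.length_drop]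
  omega

-- one step of the stage-1 inner loop leaves key t alone unless its length is len(t)
-- and the substring is t itself
theorem pv_step_other (m : List Char) (patset : PySem.Set String) (t : String) (i l : Int)
    (d : PySem.Dict String (List Int)) (h0 : 0 ≤ i) (hl : 0 ≤ l)
    (hne : l ≠ (t.toList.length : Int) ∨
      ¬ PySem.List.slice m (some i) (some (i + l)) = t.toList) :
    ((if i + l ≤ (m.length : Int) then
        if PySem.Set.contains patset (String.ofList (PySem.List.slice m (some i) (some (i + l)))) then
          d.modify (String.ofList (PySem.List.slice m (some i) (some (i + l)))) [] (fun ps => ps ++ [i])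
        else d
      else d) : PySem.Dict String (List Int)).getD t []
      = d.getD t [] := by
  split
  · next hguard =>
    split
    · rw [PySem.Dict.getD_modify, if_neg]
      intro hkey
      have hsub := (pv_ofList_eq_iff _ t).mp hkey.symm
      rcases hne with hne | hne
      · have hlen := congrArg List.length hsub
        rw [pv_length_slice m i l h0 hl hguard] at hlen
        omega
      · exact hne hsub
    · rfl
  · rfl

-- lengths that are not len(t) never touch key t of the index
theorem pv_no_touch (m : List Char) (patset : PySem.Set String) (t : String) (i : Int)
    (lens : List Int) (d : PySem.Dict String (List Int))
    (h0 : 0 ≤ i) (hlens : ∀ l ∈ lens, 0 ≤ l ∧ l ≠ (t.toList.length : Int)) :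
    (lens.foldl (fun d l =>
        if i + l ≤ (m.length : Int) then
          if PySem.Set.contains patset (String.ofList (PySem.List.slice m (some i) (some (i + l)))) then
            d.modify (String.ofList (PySem.List.slice m (some i) (some (i + l)))) [] (fun ps => ps ++ [i])
          else d
        else d) d).getD t []
      = d.getD t [] := by
  induction lens generalizing d with
  | nil => rfl
  | cons l ls ih =>
    rcases hlens l (by simp) with ⟨hl0, hlne⟩
    rw [List.foldl_cons, ih _ (fun l hl => hlens l (by simp [hl]))]
    exact pv_step_other m patset t i l d h0 hl0 (Or.inl hlne)

-- effect of one full stage-1 inner loop (one position i) on key t of the index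
theorem pv_inner_effect (m : List Char) (patset : PySem.Set String) (t : String) (i : Int)
    (lens : List Int) (d : PySem.Dict String (List Int))
    (h0 : 0 ≤ i) (hn : lens.Nodup) (hlens : ∀ l ∈ lens, 0 ≤ l)
    (hmem : (t.toList.length : Int) ∈ lens)
    (hpat : PySem.Set.contains patset t = true) :
    (lens.foldl (fun d l =>
        if i + l ≤ (m.length : Int) then
          if PySem.Set.contains patset (String.ofList (PySem.List.slice m (some i) (some (i + l)))) then
            d.modify (String.ofList (PySem.List.slice m (some i) (some (i + l)))) [] (fun ps => ps ++ [i])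
          else d
        else d) d).getD t []
      = d.getD t [] ++
        (if i + (t.toList.length : Int) ≤ (m.length : Int) ∧
            PySem.List.slice m (some i) (some (i + (t.toList.length : Int))) = t.toList
         then [i] else []) := by
  induction lens generalizing d with
  | nil => cases hmem
  | cons l ls ih =>
    rcases List.nodup_cons.mp hn with ⟨hlnot, hls⟩
    rw [List.foldl_cons]
    by_cases hlt : l = (t.toList.length : Int)
    · subst hlt
      have hnotouch : ∀ d' : PySem.Dict String (List Int), (ls.foldl (fun d l =>
            if i + l ≤ (m.length : Int) then
              let sub := PySem.List.slice m (some i) (some (i + l))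
              if PySem.Set.contains patset (String.ofList sub) then
                d.modify (String.ofList sub) [] (fun ps => ps ++ [i])
              else d
            else d) d').getD t [] = d'.getD t [] := fun d' =>
        pv_no_touch m patset t i ls d' h0
          (fun l' hl' => ⟨hlens l' (by simp [hl']), fun he => hlnot (he ▸ hl')⟩)
      rw [hnotouch]
      by_cases hsl : PySem.List.slice m (some i) (some (i + (t.toList.length : Int))) = t.toList
      · by_cases hguard : i + (t.toList.length : Int) ≤ (m.length : Int)
        · rw [if_pos hguard]
          have hkey : String.ofList (PySem.List.slice m (some i)
              (some (i + (t.toList.length : Int)))) = t := (pv_ofList_eq_iff _ t).mpr hsl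
          rw [hkey, if_pos hpat, PySem.Dict.getD_modify, if_pos rfl, if_pos ⟨hguard, hsl⟩]
        · rw [if_neg hguard, if_neg (fun h => hguard h.1), List.append_nil]
      · rw [pv_step_other m patset t i _ d h0 (by omega) (Or.inr hsl),
          if_neg (fun h => hsl h.2), List.append_nil]
    · have hmem' : (t.toList.length : Int) ∈ ls := by
        rcases List.mem_cons.mp hmem with h | h
        · exact absurd h.symm hlt
        · exact h
      rw [ih _ hls (fun l' hl' => hlens l' (by simp [hl'])) hmem',
        pv_step_other m patset t i l d h0 (hlens l (by simp)) (Or.inl hlt)]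

-- effect of the whole stage-1 sweep on key t: the matching positions, in sweep order
theorem pv_sweep (m : List Char) (patset : PySem.Set String) (t : String)
    (lens : List Int) (L : List Int) (d : PySem.Dict String (List Int))
    (hL : ∀ i ∈ L, 0 ≤ i) (hn : lens.Nodup) (hlens : ∀ l ∈ lens, 0 ≤ l)
    (hmem : (t.toList.length : Int) ∈ lens)
    (hpat : PySem.Set.contains patset t = true) :
    (L.foldl (fun d i =>
      lens.foldl (fun d l =>
        if i + l ≤ (m.length : Int) then
          if PySem.Set.contains patset (String.ofList (PySem.List.slice m (some i) (some (i + l)))) then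
            d.modify (String.ofList (PySem.List.slice m (some i) (some (i + l)))) [] (fun ps => ps ++ [i])
          else d
        else d) d) d).getD t []
      = d.getD t [] ++
        L.filter (fun i => decide (i + (t.toList.length : Int) ≤ (m.length : Int) ∧
          PySem.List.slice m (some i) (some (i + (t.toList.length : Int))) = t.toList)) := by
  induction L generalizing d with
  | nil => simp
  | cons i L ihL =>
    rw [List.foldl_cons, List.filter_cons,
      ihL _ (fun j hj => hL j (by simp [hj])),
      pv_inner_effect m patset t i lens d (hL i (by simp)) hn hlens hmem hpat]
    by_cases hc : i + (t.toList.length : Int) ≤ (m.length : Int) ∧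
        PySem.List.slice m (some i) (some (i + (t.toList.length : Int))) = t.toList
    · rw [if_pos hc, if_pos (decide_eq_true hc), List.append_assoc, List.singleton_append]
    · rw [if_neg hc, if_neg (fun h => hc (of_decide_eq_true h)), List.append_nil]

-- the matching positions of the sweep's full range are exactly A's index range filtered
-- by A's slice-equality test
theorem pv_positions (m t : List Char) :
    (PySem.List.pyRange 0 ((m.length : Int) + 1)).filter
        (fun i => decide (i + (t.length : Int) ≤ (m.length : Int) ∧
          PySem.List.slice m (some i) (some (i + (t.length : Int))) = t))
      = (PySem.List.pyRange 0 ((m.length : Int) + 1 - (t.length : Int))).filter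
        (fun i => decide (PySem.List.slice m (some i) (some (i + (t.length : Int))) = t)) := by
  by_cases hle : (t.length : Int) ≤ (m.length : Int) + 1
  · rw [PySem.List.pyRange_one_append 0 ((m.length : Int) + 1 - (t.length : Int))
        ((m.length : Int) + 1) (by omega) (by omega), List.filter_append]
    have htail : (PySem.List.pyRange ((m.length : Int) + 1 - (t.length : Int))
        ((m.length : Int) + 1)).filter
        (fun i => decide (i + (t.length : Int) ≤ (m.length : Int) ∧
          PySem.List.slice m (some i) (some (i + (t.length : Int))) = t)) = [] := by
      refine List.filter_eq_nil_iff.mpr (fun i hi => ?_)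
      rcases PySem.List.mem_pyRange_one.mp hi with ⟨hlo, hhi⟩
      simp only [decide_eq_true_eq, not_and]
      intro hc
      omega
    rw [htail, List.append_nil]
    refine List.filter_congr (fun i hi => ?_)
    rcases PySem.List.mem_pyRange_one.mp hi with ⟨hlo, hhi⟩
    refine decide_eq_decide.mpr ?_
    constructor
    · exact fun h => h.2
    · exact fun h => ⟨by omega, h⟩
  · rw [PySem.List.pyRange_one_eq_nil (by omega : (m.length : Int) + 1 - (t.length : Int) ≤ 0),
      List.filter_nil]
    refine List.filter_eq_nil_iff.mpr (fun i hi => ?_)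
    rcases PySem.List.mem_pyRange_one.mp hi with ⟨hlo, hhi⟩
    simp only [decide_eq_true_eq, not_and]
    intro hc
    omega

-- A's inner loop for one (t, rep) is the fold of adds over the filtered position list
theorem pv_innerA (m t rep : List Char) (s : PySem.Set String) :
    (PySem.List.pyRange 0 ((m.length : Int) + 1 - (t.length : Int))).foldl
        (fun newMolecules i =>
          let a := PySem.List.slice m (some 0) (some i)
          let b := PySem.List.slice m (some i) (some (i + (t.length : Int)))
          let c := PySem.List.slice m (some (i + (t.length : Int))) none
          if b = t then PySem.Set.add newMolecules (String.ofList (a ++ rep ++ c)) else newMolecules) s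
      = ((PySem.List.pyRange 0 ((m.length : Int) + 1 - (t.length : Int))).filter
          (fun i => decide (PySem.List.slice m (some i) (some (i + (t.length : Int))) = t))).foldl
        (fun s i => PySem.Set.add s (String.ofList (PySem.List.slice m none (some i) ++ rep ++
          PySem.List.slice m (some (i + (t.length : Int))) none))) s := by
  rw [List.foldl_filter]
  refine PySem.List.foldl_congr_mem _ _ _ _ (fun acc i _ => ?_)
  simp only [PySem.List.slice_zero_start]
  split <;> simp_all

-- ===== VERDICT (by name: the statement is the Claim_ definition above) =====
theorem apply_all_replacements_spec : Claim_equal_apply_all_replacements := by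
  intro molecules replacements _
  unfold Spec_apply_all_replacements apply_all_replacements apply_all_replacements_alt
  simp only [pvAltBody, PySem.Chars.len_eq, PySem.Chars.slice_eq_listSlice]
  refine PySem.List.foldl_congr_mem _ _ _ _ (fun s molecule _ => ?_)
  refine PySem.List.foldl_congr_mem _ _ _ _ (fun acc pr hpr => ?_)
  have hlenmem : ((pr.1.toList.length : Nat) : Int) ∈
      PySem.List.dedup (replacements.map (fun pr => ((pr.1.toList.length : Nat) : Int))) := by
    rw [PySem.List.mem_dedup]
    exact List.mem_map_of_mem hpr
  have hpat : PySem.Set.contains (PySem.Set.ofList (replacements.map (fun pr => pr.1))) pr.1 = true := by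
    simp [PySem.Set.contains, PySem.Set.mem_ofList]
    exact ⟨pr.2, hpr⟩
  rw [pv_sweep molecule.toList _ pr.1 _ _ PySem.Dict.empty
    (fun i hi => (PySem.List.mem_pyRange_one.mp hi).1)
    (PySem.List.nodup_dedup _)
    (fun l hl => by
      rcases List.mem_map.mp ((PySem.List.mem_dedup _ _).mp hl) with ⟨q, _, hq⟩
      rw [← hq]; omega)
    hlenmem hpat]
  rw [PySem.Dict.getD_empty, List.nil_append,
    pv_positions molecule.toList pr.1.toList,
    pv_innerA molecule.toList pr.1.toList pr.2.toList acc]
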